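-- pv_equiv track=rewrite | github.com/ben-hutchinson/pokeleximon | services/crossword-gen/crossword/bulbapedia_evidence.py | _slug_title_variants
-- ===== SOURCE A (Python) =====
-- from itertools import product
--
-- def _slug_title_variants(slug: str) -> list[str]:
--     parts = [part for part in str(slug or "").replace("_", "-").split("-") if part]
--     if not parts:
--         return []
--     if len(parts) == 1:
--         return [parts[0].capitalize()]
--
--     variants: list[str] = []
--     normalized_parts = [part.capitalize() for part in parts]
--     separator_sets = [(" ", "-")] * (len(normalized_parts) - 1)
--     if len(normalized_parts) > 5:
--         separator_combos = [tuple(" " for _ in separator_sets), tuple("-" for _ in separator_sets)]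
--     else:
--         separator_combos = product(*separator_sets)
--
--     for separators in separator_combos:
--         text = normalized_parts[0]
--         for separator, part in zip(separators, normalized_parts[1:]):
--             text += separator + part
--         variants.append(text)
--     return variants
-- ===== SOURCE B (Python) =====
-- def _slug_title_variants(slug: str) -> list[str]:
--     parts = [p.capitalize() for p in str(slug or "").replace("_", "-").split("-") if p]
--     if not parts:
--         return []
--     if len(parts) > 5:
--         return [" ".join(parts), "-".join(parts)]
--     variants = [parts[0]]
--     for part in parts[1:]:
--         variants = [v + sep + part for v in variants for sep in (" ", "-")]
--     return variants
-- ===== Notes on version B (the rewrite author's own statement) =====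
-- stated objective: simpler
-- what changed: Replaces the itertools.product enumeration of separator tuples (each re-joined by an inner zip loop) with incremental doubling of an accumulator list (one pass per part, sep innermost to keep product order), and the >5-parts branch with two plain str.join calls.
import Mathlib
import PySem

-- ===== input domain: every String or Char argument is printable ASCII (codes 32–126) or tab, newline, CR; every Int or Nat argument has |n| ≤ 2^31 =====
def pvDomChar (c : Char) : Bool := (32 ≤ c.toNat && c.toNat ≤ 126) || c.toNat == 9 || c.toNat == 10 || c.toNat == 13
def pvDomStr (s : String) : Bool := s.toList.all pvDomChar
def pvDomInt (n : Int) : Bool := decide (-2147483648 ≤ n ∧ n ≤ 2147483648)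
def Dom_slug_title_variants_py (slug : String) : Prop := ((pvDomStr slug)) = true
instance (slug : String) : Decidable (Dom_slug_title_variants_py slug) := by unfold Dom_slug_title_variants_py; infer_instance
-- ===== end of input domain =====

-- B replaces A's itertools.product enumeration (one join per separator tuple) by incremental
-- doubling of an accumulator list, and the >5-parts branch by two str.join calls; objective: simpler.

-- ===== PORT A =====
-- str.capitalize: first char uppercased, rest lowercased (exact on the ASCII domain)
def pyCapitalize (s : String) : String :=
  match s.toList with
  | [] => ""
  | c :: rest => String.ofList (PySem.Chars.upperChar c :: rest.map PySem.Chars.lowerChar)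

-- itertools.product(*[(" ", "-")] * n): all n-tuples over (" ", "-") with the last position varying fastest
def productSeps : Nat → List (List String)
  | 0 => [[]]
  | n + 1 => (productSeps n).map (" " :: ·) ++ (productSeps n).map ("-" :: ·)

def slug_title_variants_py (slug : String) : List String :=
  -- str(slug or "") = slug for a str argument; split? with sep "-" ≠ "" is always some
  let parts := ((PySem.Str.split? (PySem.Str.replace slug "_" "-") "-").getD []).filter (fun p => p != "")
  if parts.length = 0 then []
  else if parts.length = 1 then [pyCapitalize (parts.headD "")]
  else
    let normalized_parts := parts.map pyCapitalize
    let separator_combos :=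
      if normalized_parts.length > 5 then
        [List.replicate (normalized_parts.length - 1) " ", List.replicate (normalized_parts.length - 1) "-"]
      else productSeps (normalized_parts.length - 1)
    separator_combos.foldl
      (fun variants separators =>
        variants ++
          [(separators.zip (normalized_parts.drop 1)).foldl
             (fun text sp => text ++ (sp.1 ++ sp.2)) (normalized_parts.headD "")])
      []

-- ===== PORT B =====
def slug_title_variants_py_alt (slug : String) : List String :=
  let parts := (((PySem.Str.split? (PySem.Str.replace slug "_" "-") "-").getD []).filter (fun p => p != "")).map pyCapitalize
  if parts.length = 0 then []
  else if parts.length > 5 then [PySem.Str.join " " parts, PySem.Str.join "-" parts]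
  else
    (parts.drop 1).foldl
      (fun variants part => variants.flatMap (fun v => [v ++ " " ++ part, v ++ "-" ++ part]))
      [parts.headD ""]

-- ===== PRECONDITION & SPEC =====
def Spec_slug_title_variants_py (slug : String) (out : List String) : Prop := out = slug_title_variants_py_alt slug
instance (slug : String) (out : List String) : Decidable (Spec_slug_title_variants_py slug out) := by unfold Spec_slug_title_variants_py; infer_instance

-- ===== CLAIM (what is proved, stated in full; the proofs are below) =====
def Claim_equal_slug_title_variants_py : Prop := ∀ (slug : String), Dom_slug_title_variants_py slug → Spec_slug_title_variants_py slug (slug_title_variants_py slug)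

-- ===== LEMMAS AND PROOFS =====

theorem foldl_push {α β : Type} (l : List α) (f : α → β) (acc : List β) :
    l.foldl (fun a x => a ++ [f x]) acc = acc ++ l.map f := by
  induction l generalizing acc with
  | nil => simp
  | cons h t ih => simp [List.foldl, ih]

theorem str_join_cons_cons (sep a b : String) (r : List String) :
    PySem.Str.join sep (a :: b :: r) = a ++ (sep ++ PySem.Str.join sep (b :: r)) := by
  apply String.toList_inj.mp
  simp [PySem.Str.toList_join, PySem.Chars.join_cons_cons]

theorem str_join_singleton (sep a : String) : PySem.Str.join sep [a] = a := by
  apply String.toList_inj.mp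
  simp [PySem.Str.toList_join, PySem.Chars.join, List.intercalate]

theorem rep_join (T : List String) (H s : String) :
    ((List.replicate T.length s).zip T).foldl (fun text sp => text ++ (sp.1 ++ sp.2)) H
      = PySem.Str.join s (H :: T) := by
  induction T generalizing H with
  | nil => simp [str_join_singleton]
  | cons p T' ih =>
      simp only [List.length_cons, List.replicate_succ, List.zip_cons_cons, List.foldl_cons]
      rw [ih]
      cases T' with
      | nil => simp [str_join_singleton, str_join_cons_cons]
      | cons q R => simp [str_join_cons_cons, String.append_assoc]

theorem doubling (T : List String) (vs : List String) :
    T.foldl (fun variants part => variants.flatMap (fun v => [v ++ " " ++ part, v ++ "-" ++ part])) vs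
      = vs.flatMap (fun v =>
          (productSeps T.length).map (fun seps =>
            (seps.zip T).foldl (fun text sp => text ++ (sp.1 ++ sp.2)) v)) := by
  induction T generalizing vs with
  | nil => simp [productSeps]
  | cons p T' ih =>
      rw [List.foldl_cons, ih]
      simp only [List.flatMap_assoc, List.flatMap_cons, List.flatMap_nil, List.append_nil]
      congr 1
      funext x
      simp [productSeps, List.map_append, List.map_map, Function.comp_def,
        List.zip_cons_cons, String.append_assoc]

theorem core (q : List String) :
    (if q.length = 0 then []
     else if q.length = 1 then [pyCapitalize (q.headD "")]
     else
       let normalized_parts := q.map pyCapitalize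
       let separator_combos :=
         if normalized_parts.length > 5 then
           [List.replicate (normalized_parts.length - 1) " ", List.replicate (normalized_parts.length - 1) "-"]
         else productSeps (normalized_parts.length - 1)
       separator_combos.foldl
         (fun variants separators =>
           variants ++
             [(separators.zip (normalized_parts.drop 1)).foldl
                (fun text sp => text ++ (sp.1 ++ sp.2)) (normalized_parts.headD "")])
         [])
    = (let parts := q.map pyCapitalize
       if parts.length = 0 then []
       else if parts.length > 5 then [PySem.Str.join " " parts, PySem.Str.join "-" parts]
       else
         (parts.drop 1).foldl
           (fun variants part => variants.flatMap (fun v => [v ++ " " ++ part, v ++ "-" ++ part]))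
           [parts.headD ""]) := by
  match q with
  | [] => simp
  | [h] => simp
  | a :: b :: t =>
      simp only [List.length_cons, List.length_map, List.map_cons, List.headD_cons,
        List.drop_one, List.tail_cons]
      have h0 : ¬ (t.length + 1 + 1 = 0) := by omega
      have h1 : ¬ (t.length + 1 + 1 = 1) := by omega
      rw [if_neg h0, if_neg h1, if_neg h0]
      by_cases h5 : t.length + 1 + 1 > 5
      · rw [if_pos h5, if_pos h5]
        have hl : t.length + 1 + 1 - 1 = (t.map pyCapitalize).length + 1 := by simp
        simp only [List.foldl_cons, List.foldl_nil, List.nil_append, hl]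
        rw [show ((t.map pyCapitalize).length + 1 : Nat) = (pyCapitalize b :: t.map pyCapitalize).length from by simp]
        rw [rep_join, rep_join]
        simp
      · rw [if_neg h5, if_neg h5]
        have hl : t.length + 1 + 1 - 1 = (pyCapitalize b :: t.map pyCapitalize).length := by simp
        rw [hl, doubling, foldl_push]
        simp

-- ===== VERDICT (by name: the statement is the Claim_ definition above) =====
theorem slug_title_variants_py_spec : Claim_equal_slug_title_variants_py := by
  unfold Claim_equal_slug_title_variants_py Spec_slug_title_variants_py
  intro slug _
  unfold slug_title_variants_py slug_title_variants_py_alt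
  exact core _
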